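-- pv_equiv track=rewrite | github.com/caputoalessandro/NLP_2 | framenet/utils.py | get_adp_noun
-- ===== SOURCE A (Python) =====
-- def get_adp_noun(tagged):
--     adp = False
--     for w, t in reversed(tagged):
--         if t == "ADP":
--             adp = True
--             continue
--         if adp and t == "NOUN":
--             return w
-- ===== SOURCE B (Python) =====
-- def get_adp_noun(tagged):
--     # Single forward pass: track the most recent NOUN; on each ADP, record it.
--     last_noun = None
--     result = None
--     for w, t in tagged:
--         if t == "NOUN":
--             last_noun = w
--         elif t == "ADP":
--             result = last_noun
--     return result
-- ===== Notes on version B (the rewrite author's own statement) =====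
-- stated objective: alternative
-- what changed: Replaced the reversed early-exit scan with a single forward fold that tracks the most recent NOUN and records it at each ADP.
import Mathlib
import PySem

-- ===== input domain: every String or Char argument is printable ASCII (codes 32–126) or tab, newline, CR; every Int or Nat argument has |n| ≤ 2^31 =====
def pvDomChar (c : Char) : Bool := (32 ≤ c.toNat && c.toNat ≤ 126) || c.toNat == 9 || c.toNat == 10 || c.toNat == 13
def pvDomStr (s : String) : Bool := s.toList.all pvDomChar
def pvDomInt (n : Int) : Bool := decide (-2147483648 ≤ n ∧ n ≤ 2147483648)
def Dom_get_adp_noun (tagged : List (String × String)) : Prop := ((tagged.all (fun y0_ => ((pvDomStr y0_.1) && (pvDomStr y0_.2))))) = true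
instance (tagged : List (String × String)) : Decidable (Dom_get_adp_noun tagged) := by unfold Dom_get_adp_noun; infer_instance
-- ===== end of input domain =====

-- B replaces A's reversed early-exit scan with a single forward fold (alternative decomposition, same cost).


-- ===== PORT A =====
-- A's loop over reversed(tagged) with early return, flag `adp`.
def getAdpNounGoA : List (String × String) → Bool → Option String
  | [], _ => none
  | (w, t) :: rest, adp =>
    if t = "ADP" then getAdpNounGoA rest true
    else if adp && t = "NOUN" then some w
    else getAdpNounGoA rest adp

def get_adp_noun (tagged : List (String × String)) : Option String :=
  getAdpNounGoA tagged.reverse false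

-- ===== PORT B =====
-- B's forward pass: state (last_noun, result).
def getAdpNounStep (s : Option String × Option String) (p : String × String) :
    Option String × Option String :=
  if p.2 = "NOUN" then (some p.1, s.2)
  else if p.2 = "ADP" then (s.1, s.1)
  else s

def get_adp_noun_alt (tagged : List (String × String)) : Option String :=
  (tagged.foldl getAdpNounStep (none, none)).2

-- ===== PRECONDITION & SPEC =====
def Spec_get_adp_noun (tagged : List (String × String)) (out : Option String) : Prop := out = get_adp_noun_alt tagged
instance (tagged : List (String × String)) (out : Option String) : Decidable (Spec_get_adp_noun tagged out) := by unfold Spec_get_adp_noun; infer_instance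

-- ===== CLAIM (what is proved, stated in full; the proofs are below) =====
def Claim_equal_get_adp_noun : Prop := ∀ (tagged : List (String × String)), Dom_get_adp_noun tagged → Spec_get_adp_noun tagged (get_adp_noun tagged)

-- ===== LEMMAS AND PROOFS =====

-- With the flag already set, A's reversed scan returns the last NOUN word = B's first state component.
lemma goA_true (l : List (String × String)) :
    getAdpNounGoA l.reverse true = (l.foldl getAdpNounStep (none, none)).1 := by
  suffices h : ∀ s : Option String × Option String,
      (getAdpNounGoA l.reverse true).or s.1 = (l.foldl getAdpNounStep s).1 by
    simpa using h (none, none)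
  induction l using List.reverseRecOn with
  | nil => intro s; simp [getAdpNounGoA]
  | append_singleton xs x ih =>
    intro s
    obtain ⟨w, t⟩ := x
    simp only [List.reverse_append, List.reverse_cons, List.reverse_nil, List.nil_append,
      List.cons_append, List.foldl_append, List.foldl_cons, List.foldl_nil]
    by_cases hadp : t = "ADP"
    · simp [getAdpNounGoA, hadp, getAdpNounStep, ih]
    · by_cases hn : t = "NOUN"
      · simp [getAdpNounGoA, hn, getAdpNounStep]
      · simp [getAdpNounGoA, hadp, hn, getAdpNounStep, ih]

lemma goA_false (l : List (String × String)) :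
    getAdpNounGoA l.reverse false = (l.foldl getAdpNounStep (none, none)).2 := by
  induction l using List.reverseRecOn with
  | nil => simp [getAdpNounGoA]
  | append_singleton xs x ih =>
    obtain ⟨w, t⟩ := x
    simp only [List.reverse_append, List.reverse_cons, List.reverse_nil, List.nil_append,
      List.cons_append, List.foldl_append, List.foldl_cons, List.foldl_nil]
    by_cases hadp : t = "ADP"
    · simp [getAdpNounGoA, hadp, getAdpNounStep, goA_true]
    · by_cases hn : t = "NOUN"
      · simp [getAdpNounGoA, hn, getAdpNounStep, ih]
      · simp [getAdpNounGoA, hadp, hn, getAdpNounStep, ih]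

-- ===== VERDICT (by name: the statement is the Claim_ definition above) =====
theorem get_adp_noun_spec : Claim_equal_get_adp_noun := by
  intro tagged _
  unfold Spec_get_adp_noun get_adp_noun get_adp_noun_alt
  exact goA_false tagged
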